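-- pv_equiv track=rewrite | github.com/Einzieg/Comfyui2api | src/comfyui2api/comfy_workflow.py | pick_unique_load_image_target
-- ===== SOURCE A (Python) =====
-- from typing import Any, Dict, Iterable, List, Optional, Tuple
--
-- def pick_unique_load_image_target(candidates: List[Tuple[str, str, str, str]]) -> Tuple[str, str]:
--     if not candidates:
--         raise KeyError("No LoadImage node found in workflow.")
--     if len(candidates) == 1:
--         node_id, input_key, _, _ = candidates[0]
--         return node_id, input_key
--     scored: List[Tuple[int, Tuple[str, str, str, str]]] = []
--     for c in candidates:
--         node_id, input_key, cls, title = c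
--         score = 0
--         title_l = title.lower()
--         if "load" in title_l:
--             score += 10
--         if input_key == "image":
--             score += 5
--         scored.append((score, c))
--     scored.sort(key=lambda x: (x[0], x[1][0]), reverse=True)
--     best_score = scored[0][0]
--     best = [c for s, c in scored if s == best_score]
--     if len(best) == 1:
--         node_id, input_key, _, _ = best[0]
--         return node_id, input_key
--     lines = [f"Ambiguous image node. Candidates (same score={best_score}):"]
--     for node_id, input_key, cls, title in best[:12]:
--         t = title if title else "(no title)"
--         lines.append(f"  - {node_id}.{input_key}  class={cls}  title={t}")
--     raise KeyError("\n".join(lines))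
-- ===== SOURCE B (Python) =====
-- def pick_unique_load_image_target(candidates):
--     if not candidates:
--         raise KeyError("No LoadImage node found in workflow.")
--     if len(candidates) == 1:
--         node_id, input_key, _, _ = candidates[0]
--         return node_id, input_key
--
--     def score(c):
--         s = 0
--         if "load" in c[3].lower():
--             s += 10
--         if c[1] == "image":
--             s += 5
--         return s
--
--     best_score = max(score(c) for c in candidates)
--     best = [c for c in candidates if score(c) == best_score]
--     if len(best) == 1:
--         return best[0][0], best[0][1]
--     raise KeyError(
--         f"Ambiguous image node: {len(best)} candidates share the best score {best_score}."
--     )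
-- ===== Notes on version B (the rewrite author's own statement) =====
-- stated objective: simpler
-- what changed: B never sorts: a single max pass over the scores plus a filter replaces A's full (score, node_id)-descending sort and head inspection; the sort is irrelevant whenever the best-score group is a singleton, which is exactly where A returns.
import Mathlib
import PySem

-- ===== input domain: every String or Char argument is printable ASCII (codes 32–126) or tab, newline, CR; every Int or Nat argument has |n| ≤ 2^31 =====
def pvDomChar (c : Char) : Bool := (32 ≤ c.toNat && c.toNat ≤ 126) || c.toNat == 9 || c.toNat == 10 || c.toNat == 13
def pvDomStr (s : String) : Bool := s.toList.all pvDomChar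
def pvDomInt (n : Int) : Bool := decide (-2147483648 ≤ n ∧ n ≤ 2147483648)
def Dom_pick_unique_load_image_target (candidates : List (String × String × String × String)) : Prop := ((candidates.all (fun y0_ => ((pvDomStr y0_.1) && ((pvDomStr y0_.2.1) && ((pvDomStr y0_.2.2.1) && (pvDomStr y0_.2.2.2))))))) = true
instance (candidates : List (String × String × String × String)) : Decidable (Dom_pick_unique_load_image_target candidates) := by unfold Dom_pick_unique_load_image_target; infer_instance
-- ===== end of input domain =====

-- B replaces A's full (score, node_id)-descending sort with a single max-of-scores pass and a filter (simpler; the sort is irrelevant wherever A returns).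


-- ===== PORT A =====
def pick_unique_load_image_target (candidates : List (String × String × String × String)) : String × String :=
  match candidates with
  | [] => ("", "")  -- Python: raise KeyError("No LoadImage node found in workflow."); excluded by Pre_
  | c0 :: _ =>
    if candidates.length = 1 then (c0.1, c0.2.1)
    else
      let scored := candidates.map (fun c =>
        let score : Int := 0
        let score := if PySem.Str.isIn "load" (PySem.Str.lower c.2.2.2) then score + 10 else score
        let score := if c.2.1 == "image" then score + 5 else score
        (score, c))
      -- scored.sort(key=lambda x: (x[0], x[1][0]), reverse=True)
      let sortedScored := PySem.List.sorted2 scored (fun x => x.1) (fun x => x.2.1) true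
      let best_score := (sortedScored.headD ((0 : Int), c0)).1   -- scored[0][0]; the list is provably nonempty here
      let best := (sortedScored.filter (fun q => q.1 == best_score)).map (fun q => q.2)
      match best with
      | [b] => (b.1, b.2.1)
      | _ => ("", "")  -- Python: raise KeyError(ambiguity message); excluded by Pre_

-- ===== PORT B =====
-- B's local 'score' helper (also used by Pre_ below to say where A returns at all)
def pvScore (c : String × String × String × String) : Int :=
  let s : Int := 0
  let s := if PySem.Str.isIn "load" (PySem.Str.lower c.2.2.2) then s + 10 else s
  let s := if c.2.1 == "image" then s + 5 else s
  s

def pick_unique_load_image_target_alt (candidates : List (String × String × String × String)) : String × String :=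
  if candidates = [] then ("", "")  -- Python: raise KeyError; excluded by Pre_
  else
    let c0 := candidates.headD ("", "", "", "")
    let rest := candidates.tail
    if rest = [] then (c0.1, c0.2.1)
    else
      let best_score := rest.foldl (fun acc x => max acc (pvScore x)) (pvScore c0)  -- max(score(c) for c in candidates)
      let best := candidates.filter (fun x => pvScore x == best_score)
      if best.length = 1 then ((best.headD ("", "", "", "")).1, (best.headD ("", "", "", "")).2.1)
      else ("", "")  -- Python: raise KeyError (ambiguity); excluded by Pre_

-- ===== PRECONDITION & SPEC =====
-- max of the scores (running max starting from the first candidate's score)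
def pvMaxScore (candidates : List (String × String × String × String)) : Int :=
  match candidates with
  | [] => 0
  | c0 :: rest => rest.foldl (fun acc x => max acc (pvScore x)) (pvScore c0)

-- Pre_ excludes exactly the inputs where A raises KeyError: the empty list, and lists of ≥ 2
-- candidates whose best-score group is not a singleton (ambiguity).
def Pre_pick_unique_load_image_target (candidates : List (String × String × String × String)) : Prop :=
  candidates ≠ [] ∧
    (candidates.length = 1 ∨
      (candidates.filter (fun c => pvScore c == pvMaxScore candidates)).length = 1)
instance (candidates : List (String × String × String × String)) : Decidable (Pre_pick_unique_load_image_target candidates) := by unfold Pre_pick_unique_load_image_target; infer_instance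

def pvWitness_pick_unique_load_image_target : (List (String × String × String × String)) :=
  [("3", "image", "LoadImage", "Load Image"), ("7", "mask", "Other", "t")]

def Spec_pick_unique_load_image_target (candidates : List (String × String × String × String)) (out : String × String) : Prop := out = pick_unique_load_image_target_alt candidates
instance (candidates : List (String × String × String × String)) (out : String × String) : Decidable (Spec_pick_unique_load_image_target candidates out) := by unfold Spec_pick_unique_load_image_target; infer_instance

-- ===== CLAIM (what is proved, stated in full; the proofs are below) =====
def Claim_equal_pick_unique_load_image_target : Prop := ∀ (candidates : List (String × String × String × String)), Dom_pick_unique_load_image_target candidates → Pre_pick_unique_load_image_target candidates → Spec_pick_unique_load_image_target candidates (pick_unique_load_image_target candidates)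

-- ===== LEMMAS AND PROOFS =====
-- A's reverse sort keeps the first key weakly decreasing: inserting into a
-- fst-descending list with sorted2's (reverse = true) lex "before" keeps it fst-descending.
theorem pv_insertBy_pairwise {α : Type} (before : (Int × α) → (Int × α) → Bool)
    (hb : ∀ a b : Int × α, before a b = false → a.1 ≤ b.1)
    (hb' : ∀ a b : Int × α, before a b = true → b.1 ≤ a.1)
    (x : Int × α) (ys : List (Int × α))
    (h : ys.Pairwise (fun a b => b.1 ≤ a.1)) :
    (PySem.List.insertBy before x ys).Pairwise (fun a b => b.1 ≤ a.1) := by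
  induction ys with
  | nil => simp [PySem.List.insertBy.eq_1]
  | cons y ys ih =>
    rw [PySem.List.insertBy.eq_2]
    rcases List.pairwise_cons.mp h with ⟨hy, hys⟩
    by_cases hxy : before x y = true
    · simp only [hxy, if_true]
      refine List.pairwise_cons.mpr ⟨?_, h⟩
      intro z hz
      rcases List.mem_cons.mp hz with rfl | hz
      · exact hb' _ _ hxy
      · exact le_trans (hy z hz) (hb' _ _ hxy)
    · simp only [hxy]
      refine List.pairwise_cons.mpr ⟨?_, ih hys⟩
      intro z hz
      rcases (PySem.List.mem_insertBy before x z ys).mp hz with hzx | hzy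
      · subst hzx; exact hb _ _ (by simpa using hxy)
      · exact hy z hzy

theorem pv_foldl_insertBy_pairwise {α : Type} (before : (Int × α) → (Int × α) → Bool)
    (hb : ∀ a b : Int × α, before a b = false → a.1 ≤ b.1)
    (hb' : ∀ a b : Int × α, before a b = true → b.1 ≤ a.1)
    (xs acc : List (Int × α)) (h : acc.Pairwise (fun a b => b.1 ≤ a.1)) :
    (xs.foldl (fun acc x => PySem.List.insertBy before x acc) acc).Pairwise
      (fun a b => b.1 ≤ a.1) := by
  induction xs generalizing acc with
  | nil => simpa using h
  | cons x xs ih => exact ih _ (pv_insertBy_pairwise before hb hb' x acc h)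

theorem pv_sorted2_rev_pairwise {α : Type} (xs : List (Int × (String × α))) :
    (PySem.List.sorted2 xs (fun x => x.1) (fun x => x.2.1) true).Pairwise
      (fun a b => b.1 ≤ a.1) := by
  rw [PySem.List.sorted2.eq_def]
  refine pv_foldl_insertBy_pairwise _ ?_ ?_ xs [] (by simp)
  · intro a b hab
    simp only [if_true] at hab
    simp only [Bool.or_eq_false_iff, Bool.and_eq_false_iff, decide_eq_false_iff_not,
      Bool.not_eq_false', decide_eq_true_eq] at hab
    exact le_of_not_gt hab.1
  · intro a b hab
    simp only [if_true] at hab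
    rcases Bool.or_eq_true_iff.mp hab with h | h
    · exact le_of_lt (by simpa using h)
    · rcases Bool.and_eq_true_iff.mp h with ⟨h1, _⟩
      simpa using h1

-- the running max of a projection over a nonempty list is attained by some element
theorem pv_foldl_max_attained {α : Type} (f : α → Int) :
    ∀ (t : List α) (i : Int),
      t.foldl (fun acc x => max acc (f x)) i = i ∨
        ∃ x ∈ t, t.foldl (fun acc x => max acc (f x)) i = f x := by
  intro t
  induction t with
  | nil => intro i; left; rfl
  | cons y t ih =>
    intro i
    rcases ih (max i (f y)) with h | ⟨x, hx, hfx⟩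
    · simp only [List.foldl_cons]
      rcases max_choice i (f y) with hm | hm
      · left; rw [h, hm]
      · right; exact ⟨y, by simp, by rw [h, hm]⟩
    · right; exact ⟨x, by simp [hx], by simpa using hfx⟩

-- ===== VERDICT (by name: the statement is the Claim_ definition above) =====
theorem pick_unique_load_image_target_spec : Claim_equal_pick_unique_load_image_target := by
  intro candidates _ hpre
  rcases hpre with ⟨hne, hcase⟩
  unfold Spec_pick_unique_load_image_target
  match candidates with
  | [] => exact absurd rfl hne
  | c0 :: rest =>
    by_cases h1 : rest = []
    · subst h1
      simp [pick_unique_load_image_target, pick_unique_load_image_target_alt]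
    · have hlen : (c0 :: rest).length ≠ 1 := by
        intro h
        apply h1
        have h0 : rest.length = 0 := by simpa using h
        exact List.length_eq_zero_iff.mp h0
      rcases hcase with hc1 | huniq
      · exact absurd hc1 hlen
      -- notation
      set M : Int := rest.foldl (fun acc x => max acc (pvScore x)) (pvScore c0) with hM
      have hMdef : pvMaxScore (c0 :: rest) = M := rfl
      rw [hMdef] at huniq
      -- B's filter is a singleton [b]
      obtain ⟨b, hb⟩ : ∃ b, (c0 :: rest).filter (fun c => pvScore c == M) = [b] := by
        rcases hfe : (c0 :: rest).filter (fun c => pvScore c == M) with _ | ⟨b, bs⟩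
        · rw [hfe] at huniq; simp at huniq
        · rw [hfe] at huniq
          have hbs : bs = [] := by
            have : bs.length = 0 := by simpa using huniq
            exact List.length_eq_zero_iff.mp this
          exact ⟨b, by rw [hbs]⟩
      -- B's value
      have hBval : pick_unique_load_image_target_alt (c0 :: rest) = (b.1, b.2.1) := by
        unfold pick_unique_load_image_target_alt
        simp only [List.headD_cons, List.tail_cons, List.cons_ne_nil, if_false, h1, ← hM, hb]
        simp
      rw [hBval]
      -- A's side
      unfold pick_unique_load_image_target
      simp only [hlen, if_false]
      set scored := (c0 :: rest).map (fun c =>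
        let score : Int := 0
        let score := if PySem.Str.isIn "load" (PySem.Str.lower c.2.2.2) then score + 10 else score
        let score := if c.2.1 == "image" then score + 5 else score
        (score, c)) with hscored
      have hscored' : scored = (c0 :: rest).map (fun c => (pvScore c, c)) := rfl
      set sortedScored := PySem.List.sorted2 scored (fun x => x.1) (fun x => x.2.1) true with hss
      have hperm : sortedScored.Perm scored := PySem.List.sorted2_perm _ _ _ _
      have hsne : sortedScored ≠ [] := by
        intro hnil
        have := hperm.length_eq
        rw [hnil, hscored'] at this
        simp at this
      rcases hsl : sortedScored with _ | ⟨p, t⟩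
      · exact absurd hsl hsne
      have hpair := pv_sorted2_rev_pairwise scored
      rw [← hss, hsl] at hpair
      rcases List.pairwise_cons.mp hpair with ⟨hpmax, _⟩
      -- every scored element's fst is ≤ p.1
      have hub : ∀ q ∈ scored, q.1 ≤ p.1 := by
        intro q hq
        have : q ∈ p :: t := by rw [← hsl]; exact (hperm.mem_iff).mpr hq
        rcases List.mem_cons.mp this with rfl | hq'
        · exact le_refl _
        · exact hpmax q hq'
      -- p.1 = M
      have hpM : p.1 = M := by
        have hmem : p ∈ scored := by
          have : p ∈ sortedScored := by rw [hsl]; simp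
          exact (hperm.mem_iff).mp this
        rw [hscored'] at hmem
        rcases List.mem_map.mp hmem with ⟨c, hc, hpc⟩
        have hle : p.1 ≤ M := by
          rw [← hpc]
          rcases List.mem_cons.mp hc with hc0 | hc
          · rw [hc0]
            exact (PySem.List.le_foldl_max_int rest pvScore (pvScore c0)).1
          · exact (PySem.List.le_foldl_max_int rest pvScore (pvScore c0)).2 c hc
        have hge : M ≤ p.1 := by
          rcases pv_foldl_max_attained pvScore rest (pvScore c0) with h | ⟨x, hx, hfx⟩
          · have : (pvScore c0, c0) ∈ scored := by rw [hscored']; simp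
            have := hub _ this
            rw [hM, h]
            simpa using this
          · have : (pvScore x, x) ∈ scored := by
              rw [hscored']; exact List.mem_map.mpr ⟨x, by simp [hx], rfl⟩
            have := hub _ this
            rw [hM, hfx]
            simpa using this
        exact le_antisymm hle hge
      -- A's filtered list is a permutation of [(M, b)], hence equal to it
      have hfiltA : (p :: t).filter (fun q => q.1 == p.1) = [(M, b)] := by
        have h1' : ((p :: t).filter (fun q => q.1 == p.1)).Perm
            (scored.filter (fun q => q.1 == p.1)) := by
          rw [← hsl]; exact hperm.filter _
        have h2' : scored.filter (fun q => q.1 == p.1) = [(M, b)] := by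
          rw [hscored', hpM, List.filter_map]
          have hcomp : ((fun q : Int × (String × String × String × String) => q.1 == M) ∘
              (fun c => (pvScore c, c))) = (fun c => pvScore c == M) := rfl
          rw [hcomp, hb]
          simp only [List.map_cons, List.map_nil]
          have : pvScore b = M := by
            have : b ∈ (c0 :: rest).filter (fun c => pvScore c == M) := by rw [hb]; simp
            have := List.of_mem_filter this
            simpa using this
          rw [this]
        rw [h2'] at h1'
        exact List.Perm.eq_singleton h1' -- perm with a singleton is equality
      simp only [hsl, List.headD_cons] at *
      rw [hfiltA]
      simp
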